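-- pv_equiv track=rewrite | github.com/pypi-data/pypi-mirror-93 | packages/xtlib/xtlib-0.0.236.tar.gz/xtlib-0.0.236/xtlib/storage/mongo_v2.py | make_next_sub_list
-- ===== SOURCE A (Python) =====
-- def make_next_sub_list(id_list, index, max_id_length):
--     sub_list = []
--     str_len = 0
--
--     while index < len(id_list):
--         item = id_list[index]
--
--         # will item fit into sub_list?
--         str_len += (2 + len(item))   # allow for comma + space
--         if str_len > max_id_length:
--             break
--
--         # add item
--         sub_list.append(item)
--         index += 1
--
--     return sub_list
-- ===== SOURCE B (Python) =====
-- def make_next_sub_list(id_list, index, max_id_length):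
--     # table of running prefix sums over the tail, then one boundary count
--     tail = id_list[index:]
--     sums = []
--     total = 0
--     for item in tail:
--         total += 2 + len(item)
--         sums.append(total)
--     k = sum(1 for s in sums if s <= max_id_length)
--     return tail[:k]
-- ===== Notes on version B (the rewrite author's own statement) =====
-- stated objective: alternative
-- what changed: Replaces the incremental scan-with-break over a moving index by slicing the tail once, tabulating the running prefix sums of (2+len(item)), and taking the count of sums within the budget as a prefix of the tail.
-- intended difference: For a negative in-range index A's index wraps back to the front of the list after the tail (when the whole tail plus the first element still fit the budget), returning tail items followed by front items again, while B returns just the tail slice, which is the intended prefix-sublist behaviour. — e.g. on make_next_sub_list(["a", "b"], -1, 20): A returns ["b", "a", "b"], B returns ["b"]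
import Mathlib
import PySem

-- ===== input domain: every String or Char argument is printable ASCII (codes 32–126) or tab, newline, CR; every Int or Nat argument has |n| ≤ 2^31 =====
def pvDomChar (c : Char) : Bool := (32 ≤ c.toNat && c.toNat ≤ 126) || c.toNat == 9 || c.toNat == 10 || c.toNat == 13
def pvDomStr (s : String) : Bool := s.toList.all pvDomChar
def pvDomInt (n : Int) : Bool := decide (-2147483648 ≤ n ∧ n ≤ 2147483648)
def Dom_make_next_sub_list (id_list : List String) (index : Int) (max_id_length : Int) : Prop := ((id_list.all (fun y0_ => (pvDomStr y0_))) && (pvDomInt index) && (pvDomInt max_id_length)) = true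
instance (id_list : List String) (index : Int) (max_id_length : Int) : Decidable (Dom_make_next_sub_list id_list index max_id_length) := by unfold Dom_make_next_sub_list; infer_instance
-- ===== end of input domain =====

-- B builds the tail slice plus a prefix-sum table and counts the sums within budget,
-- instead of A's incremental scan-with-break; outside D_ (negative-index wraparound of A)
-- the two agree on all inputs where A returns.


-- ===== PORT A =====
-- the while loop, with fuel = an upper bound on the remaining iterations (loop runs while index < len);
-- index may be negative (Python wraps), pyGet? = none is IndexError (excluded by Pre_)
def goA (id_list : List String) (index : Int) (str_len : Int) (max_id_length : Int)
    (sub_list : List String) : Nat → List String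
  | 0 => sub_list
  | fuel + 1 =>
    if index < (id_list.length : Int) then
      match PySem.List.pyGet? id_list index with
      | none => sub_list    -- IndexError in Python; outside Pre_
      | some item =>
        let str_len' := str_len + (2 + PySem.Str.len item)
        if str_len' > max_id_length then sub_list
        else goA id_list (index + 1) str_len' max_id_length (sub_list ++ [item]) fuel
    else sub_list

def make_next_sub_list (id_list : List String) (index : Int) (max_id_length : Int) : List String :=
  goA id_list index 0 max_id_length [] ((id_list.length - index).toNat)

-- ===== PORT B =====
def make_next_sub_list_alt (id_list : List String) (index : Int) (max_id_length : Int) : List String :=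
  let tail := PySem.List.slice id_list (some index) none
  let sums := (tail.foldl (fun (st : Int × List Int) item =>
      (st.1 + (2 + PySem.Str.len item), st.2 ++ [st.1 + (2 + PySem.Str.len item)])) (0, [])).2
  let k := sums.countP (fun s => s ≤ max_id_length)
  tail.take k

-- ===== PRECONDITION & SPEC =====
-- Pre_ excludes exactly the inputs where A raises IndexError (first access id_list[index] with index < -len).
def Pre_make_next_sub_list (id_list : List String) (index : Int) (max_id_length : Int) : Prop :=
  0 ≤ index + id_list.length
instance (id_list : List String) (index : Int) (max_id_length : Int) : Decidable (Pre_make_next_sub_list id_list index max_id_length) := by unfold Pre_make_next_sub_list; infer_instance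

def pvWitness_make_next_sub_list : List String × Int × Int := (["ab", "c"], 0, 10)

-- sum of the per-item costs 2 + len(item)
def pvCosts (l : List String) : Int := (l.map (fun s => 2 + PySem.Str.len s)).sum

-- On a negative in-range index, when the whole tail and then the list's first element still fit the
-- budget, A's index wraps past the end back to the front and it returns tail items followed by front
-- items again; B returns just the fitting prefix of the tail slice, the intended sublist.
def D_make_next_sub_list (id_list : List String) (index : Int) (max_id_length : Int) : Prop :=
  index < 0 ∧ 0 ≤ index + id_list.length ∧
  pvCosts (id_list.drop (id_list.length + index).toNat ++ [id_list.headD ""]) ≤ max_id_length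
instance (id_list : List String) (index : Int) (max_id_length : Int) : Decidable (D_make_next_sub_list id_list index max_id_length) := by unfold D_make_next_sub_list; infer_instance

def Spec_make_next_sub_list (id_list : List String) (index : Int) (max_id_length : Int) (out : List String) : Prop := ¬ D_make_next_sub_list id_list index max_id_length → out = make_next_sub_list_alt id_list index max_id_length
instance (id_list : List String) (index : Int) (max_id_length : Int) (out : List String) : Decidable (Spec_make_next_sub_list id_list index max_id_length out) := by unfold Spec_make_next_sub_list; infer_instance

def pvDiffWitness_make_next_sub_list : List String × Int × Int := (["a", "b"], -1, 20)
def pvDiffWitnessOut_make_next_sub_list : (List String) × (List String) := (["b", "a", "b"], ["b"])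

-- ===== CLAIM (what is proved, stated in full; the proofs are below) =====
def Claim_unchanged_make_next_sub_list : Prop := ∀ (id_list : List String) (index : Int) (max_id_length : Int), Dom_make_next_sub_list id_list index max_id_length → Pre_make_next_sub_list id_list index max_id_length → Spec_make_next_sub_list id_list index max_id_length (make_next_sub_list id_list index max_id_length)
def Claim_changed_make_next_sub_list : Prop := Dom_make_next_sub_list (pvDiffWitness_make_next_sub_list.1) (pvDiffWitness_make_next_sub_list.2.1) (pvDiffWitness_make_next_sub_list.2.2) ∧ Pre_make_next_sub_list (pvDiffWitness_make_next_sub_list.1) (pvDiffWitness_make_next_sub_list.2.1) (pvDiffWitness_make_next_sub_list.2.2) ∧ D_make_next_sub_list (pvDiffWitness_make_next_sub_list.1) (pvDiffWitness_make_next_sub_list.2.1) (pvDiffWitness_make_next_sub_list.2.2) ∧ make_next_sub_list (pvDiffWitness_make_next_sub_list.1) (pvDiffWitness_make_next_sub_list.2.1) (pvDiffWitness_make_next_sub_list.2.2) = pvDiffWitnessOut_make_next_sub_list.1 ∧ make_next_sub_list_alt (pvDiffWitness_make_next_sub_list.1) (pvDiffWitness_make_next_sub_list.2.1) (pvDiffWitness_make_next_sub_list.2.2)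 = pvDiffWitnessOut_make_next_sub_list.2 ∧ pvDiffWitnessOut_make_next_sub_list.1 ≠ pvDiffWitnessOut_make_next_sub_list.2
def Claim_exact_make_next_sub_list : Prop := ∀ (id_list : List String) (index : Int) (max_id_length : Int), Dom_make_next_sub_list id_list index max_id_length → Pre_make_next_sub_list id_list index max_id_length → D_make_next_sub_list id_list index max_id_length → make_next_sub_list id_list index max_id_length ≠ make_next_sub_list_alt id_list index max_id_length

-- ===== LEMMAS AND PROOFS =====

-- the common scan both programs reduce to
def scanL (l : List String) (s : Int) (mx : Int) : List String :=
  match l with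
  | [] => []
  | x :: xs =>
    if s + (2 + PySem.Str.len x) > mx then []
    else x :: scanL xs (s + (2 + PySem.Str.len x)) mx

theorem len_nonneg (s : String) : 0 ≤ PySem.Str.len s := by
  simp [PySem.Str.len_eq]

theorem pvCosts_nonneg (l : List String) : 0 ≤ pvCosts l := by
  induction l with
  | nil => simp [pvCosts]
  | cons x xs ih =>
    have := len_nonneg x
    simp only [pvCosts, List.map_cons, List.sum_cons] at *
    omega

theorem scanL_nil_of_gt (l : List String) (s mx : Int) (h : mx < s) : scanL l s mx = [] := by
  cases l with
  | nil => rfl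
  | cons x xs =>
    have := len_nonneg x
    simp only [scanL]
    rw [if_pos (by omega)]

theorem scanL_append (l1 l2 : List String) (s mx : Int) :
    scanL (l1 ++ l2) s mx =
      scanL l1 s mx ++ (if s + pvCosts l1 ≤ mx then scanL l2 (s + pvCosts l1) mx else []) := by
  induction l1 generalizing s with
  | nil =>
    simp only [List.nil_append, scanL, pvCosts, List.map_nil, List.sum_nil, add_zero]
    by_cases h : s ≤ mx
    · rw [if_pos h]
    · rw [if_neg h, scanL_nil_of_gt l2 s mx (by omega)]
  | cons x xs ih =>
    have hx := len_nonneg x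
    have hxs := pvCosts_nonneg xs
    simp only [List.cons_append, scanL]
    by_cases h : s + (2 + PySem.Str.len x) > mx
    · rw [if_pos h, if_pos h]
      have hxs' := pvCosts_nonneg xs
      simp only [pvCosts] at hxs'
      have : ¬ (s + pvCosts (x :: xs) ≤ mx) := by
        simp only [pvCosts, List.map_cons, List.sum_cons]
        omega
      rw [if_neg this]
      rfl
    · rw [if_neg h, if_neg h, ih]
      have : s + (2 + PySem.Str.len x) + pvCosts xs = s + pvCosts (x :: xs) := by
        simp only [pvCosts, List.map_cons, List.sum_cons]; ring
      rw [this]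
      simp

theorem scanL_full (l : List String) (s mx : Int) (h : s + pvCosts l ≤ mx) : scanL l s mx = l := by
  induction l generalizing s with
  | nil => rfl
  | cons x xs ih =>
    have hxs := pvCosts_nonneg xs
    simp only [pvCosts] at hxs
    simp only [pvCosts, List.map_cons, List.sum_cons] at h
    simp only [scanL]
    rw [if_neg (by omega), ih _ (by simp only [pvCosts]; omega)]

-- ----- A's loop = scanL -----
theorem goA_eq (l : List String) (mx : Int) :
    ∀ (n j : Nat) (s : Int) (acc : List String), l.length - j ≤ n →
      goA l (j : Int) s mx acc n = acc ++ scanL (l.drop j) s mx := by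
  intro n
  induction n with
  | zero =>
    intro j s acc hn
    have hj : l.length ≤ j := by omega
    rw [List.drop_eq_nil_of_le hj]
    simp [goA, scanL]
  | succ n ih =>
    intro j s acc hn
    by_cases hj : j < l.length
    · rw [goA]
      rw [if_pos (by exact_mod_cast hj)]
      have hget : PySem.List.pyGet? l (j : Int) = some l[j] := by
        rw [PySem.List.pyGet?_natCast, List.getElem?_eq_getElem hj]
      rw [hget]
      have hdrop : l.drop j = l[j] :: l.drop (j + 1) := List.drop_eq_getElem_cons hj
      rw [hdrop]
      simp only [scanL]
      by_cases hb : s + (2 + PySem.Str.len l[j]) > mx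
      · simp only [if_pos hb]
        simp
      · simp only [if_neg hb]
        have hc : ((j : Int) + 1) = ((j + 1 : Nat) : Int) := by push_cast; ring
        rw [hc, ih (j + 1) _ _ (by omega)]
        simp
    · rw [goA]
      rw [if_neg (by exact_mod_cast not_lt.mpr (le_of_not_gt hj))]
      rw [List.drop_eq_nil_of_le (le_of_not_gt hj)]
      simp [scanL]

theorem goA_neg (l : List String) (mx : Int) :
    ∀ (n : Nat) (i : Int) (s : Int) (acc : List String), i < 0 → 0 ≤ i + l.length →
      ((l.length : Int) - i).toNat ≤ n →
      goA l i s mx acc n = acc ++ scanL (l.drop (l.length + i).toNat ++ l) s mx := by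
  intro n
  induction n with
  | zero => intro i s acc hi hlen hn; omega
  | succ n ih =>
    intro i s acc hi hlen hn
    have hjlt : (l.length + i).toNat < l.length := by omega
    have hget : PySem.List.pyGet? l i = some l[(l.length + i).toNat] := by
      have h2 := PySem.List.pyGet?_neg_natCast (xs := l) (k := (-i).toNat) (by omega) (by omega)
      rw [show (-(((-i).toNat : Nat) : Int)) = i from by omega] at h2
      rw [h2, show l.length - (-i).toNat = (l.length + i).toNat from by omega]
      exact List.getElem?_eq_getElem hjlt
    rw [goA, if_pos (by exact_mod_cast lt_of_lt_of_le hi (by positivity)), hget]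
    have hdrop : l.drop (l.length + i).toNat
        = l[(l.length + i).toNat] :: l.drop ((l.length + i).toNat + 1) :=
      List.drop_eq_getElem_cons hjlt
    rw [hdrop]
    simp only [List.cons_append, scanL]
    by_cases hb : s + (2 + PySem.Str.len l[(l.length + i).toNat]) > mx
    · simp only [if_pos hb]; simp
    · simp only [if_neg hb]
      by_cases hi1 : i + 1 < 0
      · rw [ih (i + 1) _ _ hi1 (by omega) (by omega)]
        rw [show (l.length + (i + 1)).toNat = (l.length + i).toNat + 1 from by omega]
        simp
      · have hi0 : i + 1 = 0 := by omega
        rw [hi0, show (0 : Int) = ((0 : Nat) : Int) from rfl,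
          goA_eq l mx n 0 _ _ (by omega)]
        rw [show (l.length + i).toNat + 1 = l.length from by omega, List.drop_length,
          List.drop_zero]
        simp

-- ----- B = scanL -----
def psums (l : List String) (s : Int) : List Int :=
  match l with
  | [] => []
  | x :: xs => (s + (2 + PySem.Str.len x)) :: psums xs (s + (2 + PySem.Str.len x))

theorem psums_ge (l : List String) (s : Int) : ∀ t ∈ psums l s, s < t := by
  induction l generalizing s with
  | nil => simp [psums]
  | cons x xs ih =>
    have hx := len_nonneg x
    intro t ht
    simp only [psums, List.mem_cons] at ht
    rcases ht with h | h
    · omega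
    · have := ih _ t h
      omega

theorem foldl_psums (l : List String) :
    ∀ (s : Int) (acc : List Int),
      (l.foldl (fun (st : Int × List Int) item =>
        (st.1 + (2 + PySem.Str.len item), st.2 ++ [st.1 + (2 + PySem.Str.len item)])) (s, acc)).2
      = acc ++ psums l s := by
  induction l with
  | nil => intro s acc; simp [psums]
  | cons x xs ih =>
    intro s acc
    simp only [List.foldl_cons]
    rw [ih]
    simp [psums]

theorem take_countP (mx : Int) (l : List String) :
    ∀ s : Int, l.take ((psums l s).countP (fun t => t ≤ mx)) = scanL l s mx := by
  induction l with
  | nil => intro s; simp [psums, scanL]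
  | cons x xs ih =>
    intro s
    simp only [psums, scanL]
    by_cases hb : s + (2 + PySem.Str.len x) > mx
    · rw [if_pos hb]
      have hz : (psums (x :: xs) s).countP (fun t => t ≤ mx) = 0 := by
        rw [List.countP_eq_zero]
        intro t ht
        simp only [psums, List.mem_cons] at ht
        have : mx < t := by
          rcases ht with h | h
          · omega
          · have := psums_ge xs _ t h; omega
        simp; omega
      simp only [psums] at hz
      rw [hz, List.take_zero]
    · rw [if_neg hb]
      have hp : (decide (s + (2 + PySem.Str.len x) ≤ mx)) = true :=
        decide_eq_true (by omega)
      rw [List.countP_cons, hp]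
      simp only [if_true]
      rw [List.take_succ_cons, ih]

theorem alt_eq (id_list : List String) (index mx : Int) :
    make_next_sub_list_alt id_list index mx =
      scanL (PySem.List.slice id_list (some index) none) 0 mx := by
  show (PySem.List.slice id_list (some index) none).take _ = _
  rw [foldl_psums _ 0 []]
  simp only [List.nil_append]
  have h := take_countP mx (PySem.List.slice id_list (some index) none) 0
  simpa using h

theorem slice_from_neg (l : List String) (i : Int) (hi : i < 0) (hp : 0 ≤ i + l.length) :
    PySem.List.slice l (some i) none = l.drop (l.length + i).toNat := by
  rw [PySem.List.slice_some_none]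
  congr 1
  have hk : 0 < (-i).toNat := by omega
  have hk2 : (-i).toNat ≤ l.length := by omega
  have : i = -((-i).toNat : Int) := by omega
  rw [this, PySem.List.clampIdx_neg_natCast _ _ hk]
  omega

-- ===== VERDICT (by name: the statement is the Claim_ definition above) =====
theorem make_next_sub_list_spec : Claim_unchanged_make_next_sub_list := by
  intro id_list index mx _ hpre hnd
  unfold Pre_make_next_sub_list at hpre
  rw [alt_eq]
  by_cases hi : 0 ≤ index
  · unfold make_next_sub_list
    have : index = ((index.toNat : Nat) : Int) := by omega
    rw [this, goA_eq id_list mx _ index.toNat 0 [] (by omega),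
      PySem.List.slice_from_natCast]
    simp
  · push_neg at hi
    unfold make_next_sub_list
    rw [goA_neg id_list mx _ index 0 [] hi (by omega) (by omega)]
    rw [slice_from_neg id_list index hi (by omega)]
    rw [scanL_append]
    unfold D_make_next_sub_list at hnd
    push_neg at hnd
    have hne : id_list ≠ [] := by
      intro h; subst h; simp at hpre; omega
    have hd := hnd hi (by omega)
    rw [show pvCosts (id_list.drop (id_list.length + index).toNat ++ [id_list.headD ""])
        = pvCosts (id_list.drop (id_list.length + index).toNat)
          + (2 + PySem.Str.len (id_list.headD "")) from by
      simp [pvCosts]] at hd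
    by_cases hc : (0 : Int) + pvCosts (id_list.drop (id_list.length + index).toNat) ≤ mx
    · rw [if_pos hc]
      have hone : scanL id_list (0 + pvCosts (id_list.drop (id_list.length + index).toNat)) mx
          = [] := by
        cases id_list with
        | nil => rfl
        | cons x xs =>
          simp only [List.headD_cons] at hd
          simp only [scanL]
          rw [if_pos (by omega)]
      rw [hone]
      simp
    · rw [if_neg hc]; simp

theorem make_next_sub_list_changed : Claim_changed_make_next_sub_list := by
  unfold Claim_changed_make_next_sub_list; decide

theorem make_next_sub_list_tight : Claim_exact_make_next_sub_list := by
  intro id_list index mx _ _ hd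
  obtain ⟨hi, hp, hfit⟩ := hd
  have hne : id_list ≠ [] := by
    intro h; subst h; simp at hp; omega
  rw [show pvCosts (id_list.drop (id_list.length + index).toNat ++ [id_list.headD ""])
      = pvCosts (id_list.drop (id_list.length + index).toNat)
        + (2 + PySem.Str.len (id_list.headD "")) from by
    simp [pvCosts]] at hfit
  unfold make_next_sub_list
  rw [goA_neg id_list mx _ index 0 [] hi (by omega) (by omega)]
  rw [alt_eq, slice_from_neg id_list index hi (by omega), scanL_append]
  have hct := pvCosts_nonneg (id_list.drop (id_list.length + index).toNat)
  cases id_list with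
  | nil => exact absurd rfl hne
  | cons x xs =>
    simp only [List.headD_cons] at hfit
    have hx := len_nonneg x
    set tail := (x :: xs).drop ((x :: xs).length + index).toNat with htail
    have hcfit : (0 : Int) + pvCosts tail ≤ mx := by omega
    rw [if_pos hcfit]
    have hBfull : scanL tail 0 mx = tail := scanL_full _ _ _ hcfit
    intro heq
    have hlen := congrArg List.length heq
    simp only [List.nil_append, List.length_append, hBfull] at hlen
    have : scanL (x :: xs) (0 + pvCosts tail) mx ≠ [] := by
      simp only [scanL]
      rw [if_neg (by omega)]
      simp
    have hpos : 0 < (scanL (x :: xs) (0 + pvCosts tail) mx).length :=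
      List.length_pos_iff.mpr this
    omega
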